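-- pv_equiv track=rewrite | github.com/mattv8/ragtime | ragtime/userspace/cloud_mounts.py | _leaf_delete_directories
-- ===== SOURCE A (Python) =====
-- def _leaf_delete_directories(directories: set[str], files: set[str]) -> list[str]:
--     leaf_dirs: list[str] = []
--     for directory in sorted(path for path in directories if path):
--         prefix = f"{directory}/"
--         if any(other != directory and other.startswith(prefix) for other in directories):
--             continue
--         if any(path.startswith(prefix) for path in files):
--             continue
--         leaf_dirs.append(f"{directory}/")
--     return leaf_dirs
-- ===== SOURCE B (Python) =====
-- def _leaf_delete_directories(directories: set[str], files: set[str]) -> list[str]: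
--     # One pass over all entries: collect every proper '/'-cut prefix (= every
--     # directory that has something under it), then filter with O(1) set lookups.
--     non_leaf: set[str] = set()
--     for entry in (*directories, *files):
--         for i, ch in enumerate(entry):
--             if ch == "/":
--                 non_leaf.add(entry[:i])
--     return [f"{d}/" for d in sorted(p for p in directories if p) if d not in non_leaf]
-- ===== Notes on version B (the rewrite author's own statement) =====
-- stated objective: faster
-- what changed: Instead of scanning every directory and file once per directory with startswith tests, B makes one pass over all entries collecting every '/'-cut prefix into a hash set, then filters the sorted directories with O(1) set-membership lookups.
import Mathlib
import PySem

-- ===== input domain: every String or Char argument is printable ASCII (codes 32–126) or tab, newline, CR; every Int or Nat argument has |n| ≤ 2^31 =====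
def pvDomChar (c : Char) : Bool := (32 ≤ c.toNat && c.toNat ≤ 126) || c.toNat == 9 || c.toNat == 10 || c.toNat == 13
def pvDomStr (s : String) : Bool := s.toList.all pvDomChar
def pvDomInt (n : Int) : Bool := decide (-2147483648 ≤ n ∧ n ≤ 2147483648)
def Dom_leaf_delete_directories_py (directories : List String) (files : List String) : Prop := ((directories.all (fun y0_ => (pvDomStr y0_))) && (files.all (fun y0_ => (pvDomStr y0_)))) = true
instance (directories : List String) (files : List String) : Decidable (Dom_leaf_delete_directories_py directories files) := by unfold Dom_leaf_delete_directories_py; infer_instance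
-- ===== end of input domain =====

-- B replaces A's per-directory scans over all entries by one pass that collects every
-- '/'-cut prefix of every entry into a set, then filters the sorted directories by membership.

-- ===== PORT A =====
def leaf_delete_directories_py (directories : List String) (files : List String) : List String :=
  let dirSet : PySem.Set String := PySem.Set.ofList directories
  let fileSet : PySem.Set String := PySem.Set.ofList files
  (PySem.List.sorted (dirSet.filter (fun p => p != "")) (fun x => x) false).foldl
    (fun acc d =>
      if dirSet.any (fun other => other != d && PySem.Str.startswith other (d ++ "/")) then acc
      else if fileSet.any (fun p => PySem.Str.startswith p (d ++ "/")) then acc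
      else acc ++ [d ++ "/"]) []

-- ===== PORT B =====
def leaf_delete_directories_py_alt (directories : List String) (files : List String) : List String :=
  let dirSet : PySem.Set String := PySem.Set.ofList directories
  let fileSet : PySem.Set String := PySem.Set.ofList files
  let nonLeaf : PySem.Set String :=
    (dirSet ++ fileSet).foldl
      (fun s e =>
        (PySem.List.enumerate e.toList 0).foldl
          (fun s ic =>
            if ic.2 == '/' then PySem.Set.add s (PySem.Str.slice e none (some ic.1)) else s)
          s)
      PySem.Set.empty
  ((PySem.List.sorted (dirSet.filter (fun p => p != "")) (fun x => x) false).filter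
      (fun d => !(PySem.Set.contains nonLeaf d))).map (fun d => d ++ "/")

-- ===== PRECONDITION & SPEC =====
def Spec_leaf_delete_directories_py (directories : List String) (files : List String) (out : List String) : Prop := out = leaf_delete_directories_py_alt directories files
instance (directories : List String) (files : List String) (out : List String) : Decidable (Spec_leaf_delete_directories_py directories files out) := by unfold Spec_leaf_delete_directories_py; infer_instance

-- ===== CLAIM (what is proved, stated in full; the proofs are below) =====
def Claim_equal_leaf_delete_directories_py : Prop := ∀ (directories : List String) (files : List String), Dom_leaf_delete_directories_py directories files → Spec_leaf_delete_directories_py directories files (leaf_delete_directories_py directories files)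

-- ===== LEMMAS AND PROOFS =====

-- A fold whose step adds exactly the elements satisfying C: membership characterisation.
theorem pv_mem_foldl {α S : Type} (mem : String → S → Prop) (F : S → α → S)
    (C : String → α → Prop)
    (hstep : ∀ s e x, mem x (F s e) ↔ mem x s ∨ C x e) :
    ∀ (l : List α) (s : S) (x : String), mem x (l.foldl F s) ↔ mem x s ∨ ∃ e ∈ l, C x e := by
  intro l
  induction l with
  | nil => simp
  | cons e t ih =>
      intro s x
      rw [List.foldl_cons, ih, hstep]
      constructor
      · rintro ((h | h) | ⟨e', he', hc⟩)
        · exact Or.inl h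
        · exact Or.inr ⟨e, by simp, h⟩
        · exact Or.inr ⟨e', by simp [he'], hc⟩
      · rintro (h | ⟨e', he', hc⟩)
        · exact Or.inl (Or.inl h)
        · rcases List.mem_cons.mp he' with rfl | he'
          · exact Or.inl (Or.inr hc)
          · exact Or.inr ⟨e', he', hc⟩

-- the inner per-entry loop: x was added iff it is a '/'-cut prefix of the entry
theorem pv_mem_inner (e : String) (s : PySem.Set String) (x : String) :
    x ∈ (PySem.List.enumerate e.toList 0).foldl
        (fun s ic =>
          if ic.2 == '/' then PySem.Set.add s (PySem.Str.slice e none (some ic.1)) else s) s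
      ↔ x ∈ s ∨ ∃ k : Nat, ∃ _ : k < e.toList.length, e.toList[k] = '/' ∧ x.toList = e.toList.take k := by
  rw [pv_mem_foldl (fun x s => x ∈ s)
        (C := fun x ic => ic.2 = '/' ∧ x = PySem.Str.slice e none (some ic.1))]
  · constructor
    · rintro (h | ⟨ic, hic, h2, rfl⟩)
      · exact Or.inl h
      · obtain ⟨k, hk, rfl⟩ := (PySem.List.mem_enumerate_iff _ _ _).mp hic
        refine Or.inr ⟨k, hk, by simpa using h2, ?_⟩
        simp [PySem.List.slice_to_natCast]
    · rintro (h | ⟨k, hk, hch, hx⟩)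
      · exact Or.inl h
      · refine Or.inr ⟨((0:Int) + k, e.toList[k]), (PySem.List.mem_enumerate_iff _ _ _).mpr ⟨k, hk, rfl⟩, hch, ?_⟩
        apply String.toList_inj.mp
        simpa [PySem.List.slice_to_natCast] using hx
  · intro s ic x
    by_cases h : ic.2 = '/'
    · simp [h, PySem.Set.mem_add]
    · simp [h]

-- the whole nonLeaf loop: x collected iff x++"/" is a prefix of some entry
theorem pv_mem_nonLeaf (l : List String) (x : String) :
    x ∈ l.foldl
        (fun s e =>
          (PySem.List.enumerate e.toList 0).foldl
            (fun s ic =>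
              if ic.2 == '/' then PySem.Set.add s (PySem.Str.slice e none (some ic.1)) else s) s)
        PySem.Set.empty
      ↔ ∃ e ∈ l, (x ++ "/").toList <+: e.toList := by
  rw [pv_mem_foldl (fun x s => x ∈ s)
        (C := fun x e => ∃ k : Nat, ∃ _ : k < e.toList.length, e.toList[k] = '/' ∧ x.toList = e.toList.take k)
        (hstep := fun s e x => pv_mem_inner e s x)]
  have hempty : x ∈ (PySem.Set.empty : PySem.Set String) ↔ False := by
    simp [PySem.Set.empty]
  rw [hempty, false_or]
  apply exists_congr; intro e
  apply and_congr_right; intro _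
  have hslash : "/".toList = ['/'] := rfl
  have htl : (x ++ "/").toList = x.toList ++ ['/'] := by
    rw [String.toList_append, hslash]
  constructor
  · rintro ⟨k, hk, hch, hx⟩
    rw [List.prefix_iff_eq_take, htl]
    have hxlen : x.toList.length = k := by
      rw [hx]; exact List.length_take_of_le hk.le
    simp only [List.length_append, List.length_cons, List.length_nil, hxlen]
    rw [List.take_succ_eq_append_getElem hk, ← hx, hch]
  · intro hpre
    rw [htl] at hpre
    have hlt : x.toList.length < e.toList.length := by
      have h := hpre.length_le
      simp only [List.length_append, List.length_cons, List.length_nil] at h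
      omega
    have hlist : x.toList ++ ['/'] = e.toList.take (x.toList.length + 1) := by
      have h := List.prefix_iff_eq_take.mp hpre
      simpa using h
    rw [List.take_succ_eq_append_getElem hlt] at hlist
    obtain ⟨hx, hc⟩ := List.append_inj hlist ((List.length_take_of_le hlt.le).symm)
    exact ⟨x.toList.length, hlt, by simpa using hc.symm, hx⟩

-- startswith (d ++ "/") forces the entry to be strictly longer than d
theorem pv_sw_ne (o d : String) (h : PySem.Str.startswith o (d ++ "/") = true) : o ≠ d := by
  intro rfl
  rw [PySem.Str.startswith_eq] at h
  have hp := (PySem.Chars.startswith_iff _ _).mp h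
  have hlen := hp.length_le
  have htl : (o ++ "/").toList = o.toList ++ ['/'] := by
    rw [String.toList_append]; rfl
  rw [htl] at hlen
  simp only [List.length_append, List.length_cons, List.length_nil] at hlen
  omega

-- the per-directory tests of A and B agree
theorem pv_pred_eq (directories files : List String) (d : String) :
    (PySem.Set.contains
        ((PySem.Set.ofList directories ++ PySem.Set.ofList files).foldl
          (fun s e =>
            (PySem.List.enumerate e.toList 0).foldl
              (fun s ic =>
                if ic.2 == '/' then PySem.Set.add s (PySem.Str.slice e none (some ic.1)) else s) s)
          PySem.Set.empty) d)
      = ((PySem.Set.ofList directories).any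
            (fun other => other != d && PySem.Str.startswith other (d ++ "/"))
        || (PySem.Set.ofList files).any (fun p => PySem.Str.startswith p (d ++ "/"))) := by
  rw [Bool.eq_iff_iff]
  rw [PySem.Set.contains_iff, pv_mem_nonLeaf]
  constructor
  · rintro ⟨e, he, hpre⟩
    have hsw : PySem.Str.startswith e (d ++ "/") = true := by
      rw [PySem.Str.startswith_eq]
      exact (PySem.Chars.startswith_iff _ _).mpr hpre
    rcases List.mem_append.mp he with h | h
    · apply Bool.or_eq_true_iff.mpr; left
      refine List.any_eq_true.mpr ⟨e, h, Bool.and_eq_true_iff.mpr ⟨?_, hsw⟩⟩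
      simpa using pv_sw_ne e d hsw
    · apply Bool.or_eq_true_iff.mpr; right
      exact List.any_eq_true.mpr ⟨e, h, hsw⟩
  · intro h
    rcases Bool.or_eq_true_iff.mp h with h | h
    · obtain ⟨e, he, hc⟩ := List.any_eq_true.mp h
      have hsw := (Bool.and_eq_true_iff.mp hc).2
      rw [PySem.Str.startswith_eq] at hsw
      exact ⟨e, List.mem_append.mpr (Or.inl he), (PySem.Chars.startswith_iff _ _).mp hsw⟩
    · obtain ⟨e, he, hc⟩ := List.any_eq_true.mp h
      rw [PySem.Str.startswith_eq] at hc
      exact ⟨e, List.mem_append.mpr (Or.inr he), (PySem.Chars.startswith_iff _ _).mp hc⟩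

-- ===== VERDICT (by name: the statement is the Claim_ definition above) =====
theorem leaf_delete_directories_py_spec : Claim_equal_leaf_delete_directories_py := by
  intro directories files _
  unfold Spec_leaf_delete_directories_py leaf_delete_directories_py leaf_delete_directories_py_alt
  set dirSet := PySem.Set.ofList directories with hdir
  set fileSet := PySem.Set.ofList files with hfile
  set L := PySem.List.sorted (dirSet.filter (fun p => p != "")) (fun x => x) false with hL
  have hstep : ∀ (acc : List String) (d : String),
      (if dirSet.any (fun other => other != d && PySem.Str.startswith other (d ++ "/")) then acc
       else if fileSet.any (fun p => PySem.Str.startswith p (d ++ "/")) then acc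
       else acc ++ [d ++ "/"])
      = (if (!(dirSet.any (fun other => other != d && PySem.Str.startswith other (d ++ "/"))
             || fileSet.any (fun p => PySem.Str.startswith p (d ++ "/"))))
         then acc ++ [d ++ "/"] else acc) := by
    intro acc d
    cases h1 : dirSet.any (fun other => other != d && PySem.Str.startswith other (d ++ "/")) <;>
      cases h2 : fileSet.any (fun p => PySem.Str.startswith p (d ++ "/")) <;> simp
  calc L.foldl
        (fun acc d =>
          if dirSet.any (fun other => other != d && PySem.Str.startswith other (d ++ "/")) then acc
          else if fileSet.any (fun p => PySem.Str.startswith p (d ++ "/")) then acc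
          else acc ++ [d ++ "/"]) []
      = L.foldl
        (fun acc d =>
          if (!(dirSet.any (fun other => other != d && PySem.Str.startswith other (d ++ "/"))
               || fileSet.any (fun p => PySem.Str.startswith p (d ++ "/"))))
          then acc ++ [d ++ "/"] else acc) [] := by
        exact PySem.List.foldl_congr_mem _ _ _ _ (fun acc d _ => hstep acc d)
    _ = [] ++ (L.filter
          (fun d => !(dirSet.any (fun other => other != d && PySem.Str.startswith other (d ++ "/"))
               || fileSet.any (fun p => PySem.Str.startswith p (d ++ "/"))))).map
          (fun d => d ++ "/") := PySem.List.foldl_append_if _ _ _ _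
    _ = (L.filter (fun d => !(PySem.Set.contains
            ((dirSet ++ fileSet).foldl
              (fun s e =>
                (PySem.List.enumerate e.toList 0).foldl
                  (fun s ic =>
                    if ic.2 == '/' then PySem.Set.add s (PySem.Str.slice e none (some ic.1)) else s) s)
              PySem.Set.empty) d))).map (fun d => d ++ "/") := by
        rw [List.nil_append]
        congr 1
        apply List.filter_congr
        intro d _
        rw [pv_pred_eq directories files d]
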